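-- pv_equiv track=rewrite | github.com/Leryk1981/ISKALA_MOVA | iskala_graph/services/document_processor.py | detect_from_metadata
-- ===== SOURCE A (Python) =====
-- from typing import Dict, List, Optional, Tuple, Union, Any
-- from enum import Enum
--
-- class LanguageCode(str, Enum):
--     """ISO 639-1 Language Codes"""
--     ENGLISH = "en"
--     UKRAINIAN = "uk"
--     RUSSIAN = "ru"
--     CHINESE = "zh"
--     SPANISH = "es"
--     FRENCH = "fr"
--     GERMAN = "de"
--     JAPANESE = "ja"
--     KOREAN = "ko"
--     ARABIC = "ar"
--     PORTUGUESE = "pt"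
--     ITALIAN = "it"
--     DUTCH = "nl"
--     POLISH = "pl"
--     CZECH = "cs"
--     AUTO = "auto"  # Auto-detection
--
-- def detect_from_metadata(source_doc: str) -> Optional[str]:
--     """Try to detect language from filename/metadata"""
--     source_lower = source_doc.lower()
--
--     # Simple heuristics
--     if any(marker in source_lower for marker in ['_uk', '_ua', 'ukrainian']):
--         return LanguageCode.UKRAINIAN
--     elif any(marker in source_lower for marker in ['_en', '_us', 'english']):
--         return LanguageCode.ENGLISH
--     elif any(marker in source_lower for marker in ['_ru', 'russian']):
--         return LanguageCode.RUSSIAN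
--     elif any(marker in source_lower for marker in ['_zh', '_cn', 'chinese']):
--         return LanguageCode.CHINESE
--
--     return None
-- ===== SOURCE B (Python) =====
-- from typing import Optional
-- from enum import Enum
--
-- class LanguageCode(str, Enum):
--     ENGLISH = "en"
--     UKRAINIAN = "uk"
--     RUSSIAN = "ru"
--     CHINESE = "zh"
--
-- _MARKERS = {
--     '_uk': 'uk', '_ua': 'uk', 'ukrainian': 'uk',
--     '_en': 'en', '_us': 'en', 'english': 'en',
--     '_ru': 'ru', 'russian': 'ru',
--     '_zh': 'zh', '_cn': 'zh', 'chinese': 'zh',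
-- }
-- _PRIORITY = ('uk', 'en', 'ru', 'zh')
--
-- def detect_from_metadata(source_doc):
--     """Single sweep: collect every marker that starts at each position into a
--     set of found languages, then return the highest-priority found language."""
--     s = source_doc.lower()
--     found = set()
--     for i in range(len(s)):
--         for marker, lang in _MARKERS.items():
--             if s.startswith(marker, i):
--                 found.add(lang)
--     for lang in _PRIORITY:
--         if lang in found:
--             return LanguageCode(lang)
--     return None
-- ===== Notes on version B (the rewrite author's own statement) =====
-- stated objective: alternative
-- what changed: Instead of A's four ordered groups of whole-string substring searches with early return, B makes one sweep over every position of the lowered string, collecting into a set each language whose marker starts there, and then resolves precedence in a separate priority pass over ('uk','en','ru','zh'); precedence moves from control flow into data.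
import Mathlib
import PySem

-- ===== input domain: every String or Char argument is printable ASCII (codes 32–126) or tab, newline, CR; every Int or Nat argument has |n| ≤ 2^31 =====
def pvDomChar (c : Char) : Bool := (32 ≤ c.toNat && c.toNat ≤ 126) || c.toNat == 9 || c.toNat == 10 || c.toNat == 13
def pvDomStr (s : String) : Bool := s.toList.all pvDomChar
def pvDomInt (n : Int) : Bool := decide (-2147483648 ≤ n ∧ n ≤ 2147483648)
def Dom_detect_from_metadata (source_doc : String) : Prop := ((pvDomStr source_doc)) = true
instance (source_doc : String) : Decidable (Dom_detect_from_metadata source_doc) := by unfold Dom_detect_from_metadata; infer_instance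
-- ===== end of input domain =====

-- B replaces A's ordered groups of substring searches by one sweep over all positions collecting
-- matched languages into a set, followed by a separate priority pass (alternative; same cost).
-- ===== PORT A =====
def detect_from_metadata (source_doc : String) : Option String :=
  let source_lower := PySem.Str.lower source_doc
  if ["_uk", "_ua", "ukrainian"].any (fun marker => PySem.Str.isIn marker source_lower) then
    some "uk"
  else if ["_en", "_us", "english"].any (fun marker => PySem.Str.isIn marker source_lower) then
    some "en"
  else if ["_ru", "russian"].any (fun marker => PySem.Str.isIn marker source_lower) then
    some "ru"
  else if ["_zh", "_cn", "chinese"].any (fun marker => PySem.Str.isIn marker source_lower) then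
    some "zh"
  else
    none

-- ===== PORT B =====
-- the _MARKERS dict as an association list in insertion order
def detMarkers : List (String × String) :=
  [("_uk", "uk"), ("_ua", "uk"), ("ukrainian", "uk"),
   ("_en", "en"), ("_us", "en"), ("english", "en"),
   ("_ru", "ru"), ("russian", "ru"),
   ("_zh", "zh"), ("_cn", "zh"), ("chinese", "zh")]

-- the sweep: for i in range(len(s)): for marker, lang in _MARKERS.items(): if s.startswith(marker, i): found.add(lang)
-- (s.startswith(marker, i) with 0 ≤ i is exactly marker.toList.isPrefixOf (l.drop i) — exact here)
def detFound (l : List Char) : PySem.Set String :=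
  (List.range l.length).foldl
    (fun found i =>
      detMarkers.foldl
        (fun found2 p => if p.1.toList.isPrefixOf (l.drop i) then PySem.Set.add found2 p.2 else found2)
        found)
    PySem.Set.empty

-- the priority pass: for lang in _PRIORITY: if lang in found: return lang
def detPick : List String → PySem.Set String → Option String
  | [], _ => none
  | lang :: rest, found =>
    if PySem.Set.contains found lang then some lang else detPick rest found

def detect_from_metadata_alt (source_doc : String) : Option String :=
  let l := PySem.Chars.lower source_doc.toList
  detPick ["uk", "en", "ru", "zh"] (detFound l)

-- ===== PRECONDITION & SPEC =====
def Spec_detect_from_metadata (source_doc : String) (out : Option String) : Prop := out = detect_from_metadata_alt source_doc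
instance (source_doc : String) (out : Option String) : Decidable (Spec_detect_from_metadata source_doc out) := by unfold Spec_detect_from_metadata; infer_instance

-- ===== CLAIM =====
def Claim_equal_detect_from_metadata : Prop := ∀ (source_doc : String), Dom_detect_from_metadata source_doc → Spec_detect_from_metadata source_doc (detect_from_metadata source_doc)

-- ===== LEMMAS AND PROOFS =====

lemma mem_markers_fold (ms : List (String × String)) (t : List Char) (acc : PySem.Set String) (x : String) :
    x ∈ ms.foldl (fun f p => if p.1.toList.isPrefixOf t then PySem.Set.add f p.2 else f) acc
      ↔ x ∈ acc ∨ ∃ p ∈ ms, p.1.toList <+: t ∧ p.2 = x := by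
  induction ms generalizing acc with
  | nil => simp
  | cons p ms ih =>
    simp only [List.foldl_cons]
    rw [ih]
    by_cases h : p.1.toList.isPrefixOf t
    · have hp := List.isPrefixOf_iff_prefix.mp h
      simp only [h, if_pos, PySem.Set.mem_add, List.mem_cons]
      constructor
      · rintro (((hx | rfl) | ⟨q, hq, h1, h2⟩))
        · exact Or.inl hx
        · exact Or.inr ⟨p, Or.inl rfl, hp, rfl⟩
        · exact Or.inr ⟨q, Or.inr hq, h1, h2⟩
      · rintro (hx | ⟨q, (rfl | hq), h1, h2⟩)
        · exact Or.inl (Or.inl hx)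
        · exact Or.inl (Or.inr h2.symm)
        · exact Or.inr ⟨q, hq, h1, h2⟩
    · have hp : ¬ p.1.toList <+: t := fun hc => h (List.isPrefixOf_iff_prefix.mpr hc)
      simp only [h, List.mem_cons]
      constructor
      · rintro (hx | ⟨q, hq, h1, h2⟩)
        · exact Or.inl hx
        · exact Or.inr ⟨q, Or.inr hq, h1, h2⟩
      · rintro (hx | ⟨q, (rfl | hq), h1, h2⟩)
        · exact Or.inl hx
        · exact absurd h1 hp
        · exact Or.inr ⟨q, hq, h1, h2⟩

lemma mem_range_fold (idxs : List Nat) (l : List Char) (acc : PySem.Set String) (x : String) :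
    x ∈ idxs.foldl
        (fun found i =>
          detMarkers.foldl
            (fun found2 p => if p.1.toList.isPrefixOf (l.drop i) then PySem.Set.add found2 p.2 else found2)
            found) acc
      ↔ x ∈ acc ∨ ∃ i ∈ idxs, ∃ p ∈ detMarkers, p.1.toList <+: l.drop i ∧ p.2 = x := by
  induction idxs generalizing acc with
  | nil => simp
  | cons i idxs ih =>
    simp only [List.foldl_cons]
    rw [ih, mem_markers_fold]
    constructor
    · rintro ((hx | ⟨p, hp, h1, h2⟩) | ⟨j, hj, hrest⟩)
      · exact Or.inl hx
      · exact Or.inr ⟨i, List.mem_cons_self .., p, hp, h1, h2⟩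
      · exact Or.inr ⟨j, List.mem_cons_of_mem _ hj, hrest⟩
    · rintro (hx | ⟨j, hj, hrest⟩)
      · exact Or.inl (Or.inl hx)
      · rcases List.mem_cons.mp hj with rfl | hj
        · exact Or.inl (Or.inr hrest)
        · exact Or.inr ⟨j, hj, hrest⟩

lemma mem_detFound (l : List Char) (x : String) :
    x ∈ detFound l ↔ ∃ i ∈ List.range l.length, ∃ p ∈ detMarkers, p.1.toList <+: l.drop i ∧ p.2 = x := by
  unfold detFound
  rw [mem_range_fold]
  simp [PySem.Set.empty]

lemma exists_range_prefix (m l : List Char) (hm : m ≠ []) :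
    (∃ i ∈ List.range l.length, m <+: l.drop i) ↔ PySem.Chars.isIn m l = true := by
  rw [← PySem.Chars.exists_prefix_drop_iff_isIn]
  constructor
  · rintro ⟨i, _, h⟩; exact ⟨i, h⟩
  · rintro ⟨j, h⟩
    by_cases hj : j < l.length
    · exact ⟨j, List.mem_range.mpr hj, h⟩
    · have hd : l.drop j = [] := List.drop_eq_nil_of_le (le_of_not_gt hj)
      rw [hd] at h
      exact absurd (List.prefix_nil.mp h) hm

lemma detMarkers_ne_nil : ∀ p ∈ detMarkers, p.1.toList ≠ [] := by decide

lemma contains_detFound (l : List Char) (x : String) :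
    PySem.Set.contains (detFound l) x = true
      ↔ ∃ p ∈ detMarkers, p.2 = x ∧ PySem.Chars.isIn p.1.toList l = true := by
  rw [PySem.Set.contains_iff, mem_detFound]
  constructor
  · rintro ⟨i, hi, p, hp, h1, h2⟩
    refine ⟨p, hp, h2, ?_⟩
    have hm : p.1.toList ≠ [] := detMarkers_ne_nil p hp
    exact (exists_range_prefix _ l hm).mp ⟨i, hi, h1⟩
  · rintro ⟨p, hp, h2, h1⟩
    have hm : p.1.toList ≠ [] := detMarkers_ne_nil p hp
    obtain ⟨i, hi, hpre⟩ := (exists_range_prefix _ l hm).mpr h1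
    exact ⟨i, hi, p, hp, hpre, h2⟩

lemma bool_eq_of_iff {a b : Bool} (h : a = true ↔ b = true) : a = b := by
  cases a <;> cases b <;> simp_all

lemma cond_eq (s : String) (lang : String) (group : List String)
    (h : (detMarkers.filter (fun p => p.2 == lang)).map Prod.fst = group) :
    PySem.Set.contains (detFound (PySem.Chars.lower s.toList)) lang
      = group.any (fun marker => PySem.Str.isIn marker (PySem.Str.lower s)) := by
  apply bool_eq_of_iff
  rw [contains_detFound, List.any_eq_true]
  have hiff : ∀ m : String, m ∈ group ↔ ∃ p ∈ detMarkers, p.2 = lang ∧ p.1 = m := by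
    intro m
    rw [← h, List.mem_map]
    constructor
    · rintro ⟨p, hp, rfl⟩
      rcases List.mem_filter.mp hp with ⟨hp1, hp2⟩
      exact ⟨p, hp1, by simpa using hp2, rfl⟩
    · rintro ⟨p, hp, h2, rfl⟩
      exact ⟨p, List.mem_filter.mpr ⟨hp, by simpa using h2⟩, rfl⟩
  constructor
  · rintro ⟨p, hp, h2, h1⟩
    refine ⟨p.1, (hiff p.1).mpr ⟨p, hp, h2, rfl⟩, ?_⟩
    simpa [PySem.Str.isIn_eq, PySem.Str.toList_lower] using h1
  · rintro ⟨m, hm, hin⟩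
    obtain ⟨p, hp, h2, rfl⟩ := (hiff m).mp hm
    refine ⟨p, hp, h2, ?_⟩
    simpa [PySem.Str.isIn_eq, PySem.Str.toList_lower] using hin

-- ===== VERDICT =====
theorem detect_from_metadata_spec : Claim_equal_detect_from_metadata := by
  intro s _
  unfold Spec_detect_from_metadata detect_from_metadata detect_from_metadata_alt
  simp only [detPick]
  rw [cond_eq s "uk" ["_uk", "_ua", "ukrainian"] (by decide),
      cond_eq s "en" ["_en", "_us", "english"] (by decide),
      cond_eq s "ru" ["_ru", "russian"] (by decide),
      cond_eq s "zh" ["_zh", "_cn", "chinese"] (by decide)]
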